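-- pv_equiv track=rewrite | github.com/francescolonardo/CTF_writeups_NLP_analysis | openai_analysis/04_data_labelling/04_organize_labelled_substeps_tier1.py | organize_data_by_taxonomy
-- ===== SOURCE A (Python) =====
-- def organize_data_by_taxonomy(data):
--     taxonomy_to_substep = {}
--
--     for entry in data:
--         taxonomy_value = entry["Tier1Taxonomy"]
--
--         if taxonomy_value not in taxonomy_to_substep:
--             taxonomy_to_substep[taxonomy_value] = []
--
--         taxonomy_to_substep[taxonomy_value].append(entry["SubstepString"])
--
--     return taxonomy_to_substep
-- ===== SOURCE B (Python) =====
-- def organize_data_by_taxonomy(data):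
--     keys = list(dict.fromkeys(entry["Tier1Taxonomy"] for entry in data))
--     return {
--         k: [entry["SubstepString"] for entry in data if entry["Tier1Taxonomy"] == k]
--         for k in keys
--     }
-- ===== Notes on version B (the rewrite author's own statement) =====
-- stated objective: alternative
-- what changed: Replaces the single incremental dict-building pass (create-empty-then-append per entry) with a keys-first decomposition: collect the distinct Tier1Taxonomy values in first-appearance order, then build the result by one filtering comprehension per key.
import Mathlib
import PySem

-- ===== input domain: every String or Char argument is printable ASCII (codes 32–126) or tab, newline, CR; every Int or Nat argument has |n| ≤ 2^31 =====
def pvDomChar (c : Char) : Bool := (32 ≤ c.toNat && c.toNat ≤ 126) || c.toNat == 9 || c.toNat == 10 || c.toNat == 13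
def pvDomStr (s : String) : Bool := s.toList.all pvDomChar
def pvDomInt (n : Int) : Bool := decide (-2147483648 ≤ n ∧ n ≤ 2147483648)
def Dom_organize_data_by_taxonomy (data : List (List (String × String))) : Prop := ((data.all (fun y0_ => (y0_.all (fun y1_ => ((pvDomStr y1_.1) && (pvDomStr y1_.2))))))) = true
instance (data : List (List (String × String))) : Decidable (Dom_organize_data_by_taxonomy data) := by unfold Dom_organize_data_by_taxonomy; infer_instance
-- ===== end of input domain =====

-- B groups by distinct keys (first-appearance order) with one filtering pass per key,
-- instead of A's single incremental dict-building pass; objective: alternative decomposition.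

-- entry["k"]: first-match lookup in the entry dict; total form, used only under Pre_ (key present)
def pvEntryGet (e : List (String × String)) (k : String) : String :=
  (PySem.Dict.mk e).getD k ""

-- ===== PORT A =====
def organize_data_by_taxonomy (data : List (List (String × String))) : List (String × List String) :=
  (data.foldl
    (fun d entry =>
      let t := pvEntryGet entry "Tier1Taxonomy"
      let d' := if d.contains t then d else d.insert t ([] : List String)
      d'.modify t [] (fun l => l ++ [pvEntryGet entry "SubstepString"]))
    PySem.Dict.empty).items

-- ===== PORT B =====
def organize_data_by_taxonomy_alt (data : List (List (String × String))) : List (String × List String) :=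
  let keys := PySem.List.dedup (data.map (fun e => pvEntryGet e "Tier1Taxonomy"))
  keys.map (fun k =>
    (k, (data.filter (fun e => pvEntryGet e "Tier1Taxonomy" == k)).map
          (fun e => pvEntryGet e "SubstepString")))

-- ===== PRECONDITION & SPEC =====
-- Pre_ excludes exactly the entries on which A raises KeyError: every entry must carry both keys.
def Pre_organize_data_by_taxonomy (data : List (List (String × String))) : Prop :=
  (data.all (fun e => (PySem.Dict.mk e).contains "Tier1Taxonomy" && (PySem.Dict.mk e).contains "SubstepString")) = true
instance (data : List (List (String × String))) : Decidable (Pre_organize_data_by_taxonomy data) := by unfold Pre_organize_data_by_taxonomy; infer_instance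

def pvWitness_organize_data_by_taxonomy : (List (List (String × String))) :=
  [[("Tier1Taxonomy", "recon"), ("SubstepString", "scan ports")],
   [("Tier1Taxonomy", "recon"), ("SubstepString", "enumerate users")],
   [("Tier1Taxonomy", "exploit"), ("SubstepString", "run payload")]]

def Spec_organize_data_by_taxonomy (data : List (List (String × String))) (out : List (String × List String)) : Prop := out = organize_data_by_taxonomy_alt data
instance (data : List (List (String × String))) (out : List (String × List String)) : Decidable (Spec_organize_data_by_taxonomy data out) := by unfold Spec_organize_data_by_taxonomy; infer_instance

-- ===== CLAIM (what is proved, stated in full; the proofs are below) =====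
def Claim_equal_organize_data_by_taxonomy : Prop := ∀ (data : List (List (String × String))), Dom_organize_data_by_taxonomy data → Pre_organize_data_by_taxonomy data → Spec_organize_data_by_taxonomy data (organize_data_by_taxonomy data)

-- ===== LEMMAS AND PROOFS =====

-- A's loop body, named for the proofs
def pvStepA (d : PySem.Dict String (List String)) (entry : List (String × String)) :
    PySem.Dict String (List String) :=
  let t := pvEntryGet entry "Tier1Taxonomy"
  let d' := if d.contains t then d else d.insert t ([] : List String)
  d'.modify t [] (fun l => l ++ [pvEntryGet entry "SubstepString"])

lemma pvStepA_keys (d : PySem.Dict String (List String)) (e : List (String × String)) :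
    (pvStepA d e).keys = PySem.Set.add d.keys (pvEntryGet e "Tier1Taxonomy") := by
  unfold pvStepA
  rw [PySem.Dict.keys_modify, PySem.Set.add_eq_ite]
  by_cases h : d.contains (pvEntryGet e "Tier1Taxonomy") = true
  · simp only [h, if_pos]
    rw [PySem.Dict.keys_insert_of_contains _ _ h,
        if_pos ((PySem.Dict.contains_iff_mem_keys _ _).mp h)]
  · have h' : d.contains (pvEntryGet e "Tier1Taxonomy") = false := by
      simpa using h
    simp only [h', Bool.false_eq_true, if_false]
    rw [PySem.Dict.keys_insert_of_contains _ _ (PySem.Dict.contains_insert_self _ _ _),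
        PySem.Dict.keys_insert_of_not_contains _ _ h',
        if_neg (fun hm => h ((PySem.Dict.contains_iff_mem_keys _ _).mpr hm))]

lemma pvStepA_getD (d : PySem.Dict String (List String)) (e : List (String × String)) (k : String) :
    (pvStepA d e).getD k [] =
      if k = pvEntryGet e "Tier1Taxonomy"
      then d.getD (pvEntryGet e "Tier1Taxonomy") [] ++ [pvEntryGet e "SubstepString"]
      else d.getD k [] := by
  unfold pvStepA
  rw [PySem.Dict.getD_modify]
  by_cases hc : d.contains (pvEntryGet e "Tier1Taxonomy") = true
  · simp only [hc, if_pos]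
  · have h' : d.contains (pvEntryGet e "Tier1Taxonomy") = false := by simpa using hc
    simp only [h', Bool.false_eq_true, if_false]
    by_cases hk : k = pvEntryGet e "Tier1Taxonomy"
    · simp only [hk]
      rw [PySem.Dict.getD_insert_self, PySem.Dict.getD_of_not_contains _ _ h']
    · simp only [hk, if_false]
      rw [PySem.Dict.getD_insert_of_ne _ _ _ hk]

-- Loop invariant: keys gathered as a set, per-key value = filtered substeps
lemma pvInv (data : List (List (String × String))) :
    ∀ (d : PySem.Dict String (List String)), d.keys.Nodup →
      (data.foldl pvStepA d).keys
          = PySem.Set.update d.keys (data.map (fun e => pvEntryGet e "Tier1Taxonomy"))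
      ∧ (data.foldl pvStepA d).keys.Nodup
      ∧ ∀ k, (data.foldl pvStepA d).getD k []
          = d.getD k [] ++ (data.filter (fun e => pvEntryGet e "Tier1Taxonomy" == k)).map
              (fun e => pvEntryGet e "SubstepString") := by
  induction data with
  | nil => intro d hd; refine ⟨by simp [PySem.Set.update], hd, fun k => by simp⟩
  | cons e rest ih =>
    intro d hd
    have hkeys := pvStepA_keys d e
    have hnd : (pvStepA d e).keys.Nodup := hkeys ▸ PySem.Set.nodup_add _ _ hd
    obtain ⟨h1, h2, h3⟩ := ih (pvStepA d e) hnd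
    refine ⟨?_, h2, ?_⟩
    · rw [List.foldl_cons, h1, hkeys, List.map_cons, PySem.Set.update_cons]
    · intro k
      rw [List.foldl_cons, h3 k, pvStepA_getD, List.filter_cons]
      by_cases hk : pvEntryGet e "Tier1Taxonomy" = k
      · simp [hk]
      · have : ¬ k = pvEntryGet e "Tier1Taxonomy" := fun h => hk h.symm
        simp [hk, this]

-- ===== VERDICT (by name: the statement is the Claim_ definition above) =====
theorem organize_data_by_taxonomy_spec : Claim_equal_organize_data_by_taxonomy := by
  intro data _ _
  unfold Spec_organize_data_by_taxonomy organize_data_by_taxonomy organize_data_by_taxonomy_alt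
  have hstep : (fun d entry =>
      let t := pvEntryGet entry "Tier1Taxonomy"
      let d' := if d.contains t then d else d.insert t ([] : List String)
      d'.modify t [] (fun l => l ++ [pvEntryGet entry "SubstepString"])) = pvStepA := rfl
  rw [hstep]
  obtain ⟨h1, h2, h3⟩ := pvInv data PySem.Dict.empty (by simp [PySem.Dict.keys_empty])
  rw [PySem.Dict.items_eq_map_keys _ h2 ([] : List String), h1,
      PySem.Dict.keys_empty, PySem.Set.update_nil_left, PySem.List.dedup_eq_ofList]
  refine List.map_congr_left (fun k _ => ?_)
  rw [h3 k, PySem.Dict.getD_empty, List.nil_append]
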